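-- pv_equiv track=rewrite | github.com/pypi-data/pypi-mirror-403 | packages/aria2tui/aria2tui-0.1.13.0.tar.gz/aria2tui-0.1.13.0/src/aria2tui/utils/aria2c/options.py | _organize_options_into_sections
-- ===== SOURCE A (Python) =====
-- def _organize_options_into_sections(options: dict) -> dict:
--     """
--     Organize aria2 options into logical sections for the form interface.
--
--     Args:
--         options: Flat dictionary of aria2 options
--
--     Returns:
--         Dictionary organized by sections with nested option dictionaries
--     """
--     # Define section categorization
--     basic_options = ["out", "dir", "input-file", "log", "max-concurrent-downloads",
--                      "check-integrity", "continue", "all-proxy", "all-proxy-user",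
--                      "all-proxy-passwd"]
--
--     connection_options = ["max-connection-per-server", "min-split-size", "split",
--                           "max-tries", "retry-wait", "timeout", "connect-timeout",
--                           "max-file-not-found", "max-overall-download-limit",
--                           "max-download-limit", "lowest-speed-limit"]
--
--     http_ftp_options = ["http-proxy", "http-proxy-user", "http-proxy-passwd",
--                         "https-proxy", "https-proxy-user", "https-proxy-passwd",
--                         "ftp-proxy", "ftp-proxy-user", "ftp-proxy-passwd",
--                         "http-user", "http-passwd", "ftp-user", "ftp-passwd",
--                         "user-agent", "referer", "load-cookies", "save-cookies",
--                         "header", "use-head", "enable-http-pipelining",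
--                         "enable-http-keep-alive"]
--
--     bittorrent_options = ["bt-enable-lpd", "bt-max-peers", "bt-request-peer-speed-limit",
--                           "bt-max-open-files", "bt-seed-unverified", "bt-save-metadata",
--                           "bt-tracker", "bt-exclude-tracker", "enable-dht", "enable-peer-exchange",
--                           "seed-ratio", "seed-time", "max-upload-limit", "max-overall-upload-limit",
--                           "bt-require-crypto", "bt-min-crypto-level", "follow-torrent",
--                           "pause-metadata", "bt-detach-seed-only"]
--
--     form_dict = {
--         "Basic Options": {},
--         "Connection Options": {},
--         "HTTP/FTP Options": {},
--         "BitTorrent Options": {},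
--         "Advanced Options": {}
--     }
--
--     # Categorize options
--     for key, value in options.items():
--         if key in basic_options:
--             form_dict["Basic Options"][key] = value
--         elif key in connection_options:
--             form_dict["Connection Options"][key] = value
--         elif key in http_ftp_options:
--             form_dict["HTTP/FTP Options"][key] = value
--         elif key in bittorrent_options:
--             form_dict["BitTorrent Options"][key] = value
--         else:
--             form_dict["Advanced Options"][key] = value
--
--     # Remove empty sections
--     form_dict = {k: v for k, v in form_dict.items() if v}
--
--     return form_dict
-- ===== SOURCE B (Python) =====
-- def _organize_options_into_sections(options: dict) -> dict:
--     """Section-major rewrite: build an option->section index once, then emit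
--     each section's options with one comprehension per section."""
--     categories = [
--         ("Basic Options",
--          ["out", "dir", "input-file", "log", "max-concurrent-downloads",
--           "check-integrity", "continue", "all-proxy", "all-proxy-user",
--           "all-proxy-passwd"]),
--         ("Connection Options",
--          ["max-connection-per-server", "min-split-size", "split",
--           "max-tries", "retry-wait", "timeout", "connect-timeout",
--           "max-file-not-found", "max-overall-download-limit",
--           "max-download-limit", "lowest-speed-limit"]),
--         ("HTTP/FTP Options",
--          ["http-proxy", "http-proxy-user", "http-proxy-passwd",
--           "https-proxy", "https-proxy-user", "https-proxy-passwd",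
--           "ftp-proxy", "ftp-proxy-user", "ftp-proxy-passwd",
--           "http-user", "http-passwd", "ftp-user", "ftp-passwd",
--           "user-agent", "referer", "load-cookies", "save-cookies",
--           "header", "use-head", "enable-http-pipelining",
--           "enable-http-keep-alive"]),
--         ("BitTorrent Options",
--          ["bt-enable-lpd", "bt-max-peers", "bt-request-peer-speed-limit",
--           "bt-max-open-files", "bt-seed-unverified", "bt-save-metadata",
--           "bt-tracker", "bt-exclude-tracker", "enable-dht", "enable-peer-exchange",
--           "seed-ratio", "seed-time", "max-upload-limit", "max-overall-upload-limit",
--           "bt-require-crypto", "bt-min-crypto-level", "follow-torrent",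
--           "pause-metadata", "bt-detach-seed-only"]),
--     ]
--     section_map = {}
--     for name, keys in categories:
--         for k in keys:
--             section_map.setdefault(k, name)
--     order = [name for name, _ in categories] + ["Advanced Options"]
--     result = {}
--     for name in order:
--         picked = {k: v for k, v in options.items()
--                   if section_map.get(k, "Advanced Options") == name}
--         if picked:
--             result[name] = picked
--     return result
-- ===== Notes on version B (the rewrite author's own statement) =====
-- stated objective: idiomatic
-- what changed: B builds an option-name-to-section inverted index once (setdefault, first list wins) and then emits the result section by section with one comprehension per section, instead of A's per-key four-way list-membership elif chain filling a nested dict.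
import Mathlib
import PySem

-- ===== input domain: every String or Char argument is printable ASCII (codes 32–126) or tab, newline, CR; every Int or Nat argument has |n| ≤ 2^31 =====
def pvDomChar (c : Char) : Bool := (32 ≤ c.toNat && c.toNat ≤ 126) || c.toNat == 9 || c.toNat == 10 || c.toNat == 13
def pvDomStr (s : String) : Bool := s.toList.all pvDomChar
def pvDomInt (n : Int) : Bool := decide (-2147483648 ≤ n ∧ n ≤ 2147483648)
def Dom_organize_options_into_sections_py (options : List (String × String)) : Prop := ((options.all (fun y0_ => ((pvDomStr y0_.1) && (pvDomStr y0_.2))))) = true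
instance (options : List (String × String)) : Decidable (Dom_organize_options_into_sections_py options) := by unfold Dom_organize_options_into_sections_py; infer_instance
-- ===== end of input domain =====

-- B is an idiomatic section-major rewrite: an option→section index built once, then one pass per section; same return value as A.

-- shared literal constants (the four category lists, exactly as in the Python sources)
def pvBasic : List String :=
  ["out", "dir", "input-file", "log", "max-concurrent-downloads",
   "check-integrity", "continue", "all-proxy", "all-proxy-user",
   "all-proxy-passwd"]

def pvConn : List String :=
  ["max-connection-per-server", "min-split-size", "split",
   "max-tries", "retry-wait", "timeout", "connect-timeout",
   "max-file-not-found", "max-overall-download-limit",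
   "max-download-limit", "lowest-speed-limit"]

def pvHttp : List String :=
  ["http-proxy", "http-proxy-user", "http-proxy-passwd",
   "https-proxy", "https-proxy-user", "https-proxy-passwd",
   "ftp-proxy", "ftp-proxy-user", "ftp-proxy-passwd",
   "http-user", "http-passwd", "ftp-user", "ftp-passwd",
   "user-agent", "referer", "load-cookies", "save-cookies",
   "header", "use-head", "enable-http-pipelining",
   "enable-http-keep-alive"]

def pvBt : List String :=
  ["bt-enable-lpd", "bt-max-peers", "bt-request-peer-speed-limit",
   "bt-max-open-files", "bt-seed-unverified", "bt-save-metadata",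
   "bt-tracker", "bt-exclude-tracker", "enable-dht", "enable-peer-exchange",
   "seed-ratio", "seed-time", "max-upload-limit", "max-overall-upload-limit",
   "bt-require-crypto", "bt-min-crypto-level", "follow-torrent",
   "pause-metadata", "bt-detach-seed-only"]

-- ===== PORT A =====
-- A: nested dict skeleton with five fixed sections, per-key elif chain of list memberships, then drop empty sections.
def organize_options_into_sections_py (options : List (String × String)) : List (String × List (String × String)) :=
  let form0 : PySem.Dict String (PySem.Dict String String) :=
    PySem.Dict.ofList
      [("Basic Options", PySem.Dict.empty), ("Connection Options", PySem.Dict.empty),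
       ("HTTP/FTP Options", PySem.Dict.empty), ("BitTorrent Options", PySem.Dict.empty),
       ("Advanced Options", PySem.Dict.empty)]
  let fd := options.foldl (fun fd kv =>
      if pvBasic.contains kv.1 then
        fd.modify "Basic Options" PySem.Dict.empty (fun d => d.insert kv.1 kv.2)
      else if pvConn.contains kv.1 then
        fd.modify "Connection Options" PySem.Dict.empty (fun d => d.insert kv.1 kv.2)
      else if pvHttp.contains kv.1 then
        fd.modify "HTTP/FTP Options" PySem.Dict.empty (fun d => d.insert kv.1 kv.2)
      else if pvBt.contains kv.1 then
        fd.modify "BitTorrent Options" PySem.Dict.empty (fun d => d.insert kv.1 kv.2)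
      else
        fd.modify "Advanced Options" PySem.Dict.empty (fun d => d.insert kv.1 kv.2)) form0
  -- {k: v for k, v in form_dict.items() if v}  (keys already distinct; inner dicts rendered as item lists)
  fd.items.filterMap (fun p => if p.2.items.isEmpty then none else some (p.1, p.2.items))

-- ===== PORT B =====
-- B-side helpers: the categories table and the inverted index (setdefault = first list wins)
def pvCats : List (String × List String) :=
  [("Basic Options", pvBasic), ("Connection Options", pvConn),
   ("HTTP/FTP Options", pvHttp), ("BitTorrent Options", pvBt)]

def pvSectionMap : PySem.Dict String String :=
  pvCats.foldl (fun d p => p.2.foldl (fun d k => d.setdefault k p.1) d) PySem.Dict.empty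

def organize_options_into_sections_py_alt (options : List (String × String)) : List (String × List (String × String)) :=
  let order := pvCats.map (·.1) ++ ["Advanced Options"]
  order.foldl (fun res name =>
      let picked : PySem.Dict String String :=
        options.foldl (fun d kv =>
          if pvSectionMap.getD kv.1 "Advanced Options" == name then d.insert kv.1 kv.2 else d)
          PySem.Dict.empty
      if picked.items.isEmpty then res else res ++ [(name, picked.items)]) []

-- ===== PRECONDITION & SPEC =====
def Spec_organize_options_into_sections_py (options : List (String × String)) (out : List (String × List (String × String))) : Prop := out = organize_options_into_sections_py_alt options
instance (options : List (String × String)) (out : List (String × List (String × String))) : Decidable (Spec_organize_options_into_sections_py options out) := by unfold Spec_organize_options_into_sections_py; infer_instance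

-- ===== CLAIM (what is proved, stated in full; the proofs are below) =====
def Claim_equal_organize_options_into_sections_py : Prop := ∀ (options : List (String × String)), Dom_organize_options_into_sections_py options → Spec_organize_options_into_sections_py options (organize_options_into_sections_py options)

-- ===== LEMMAS AND PROOFS =====

-- the classification A's elif chain computes for a key
def pvClassify (k : String) : String :=
  if pvBasic.contains k then "Basic Options"
  else if pvConn.contains k then "Connection Options"
  else if pvHttp.contains k then "HTTP/FTP Options"
  else if pvBt.contains k then "BitTorrent Options"
  else "Advanced Options"

-- the per-section accumulation both programs perform
def pvPick (n : String) (options : List (String × String)) (d : PySem.Dict String String) : PySem.Dict String String :=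
  options.foldl (fun d kv => if pvClassify kv.1 = n then d.insert kv.1 kv.2 else d) d

theorem pvPick_cons (n : String) (kv : String × String) (rest : List (String × String)) (d : PySem.Dict String String) :
    pvPick n (kv :: rest) d = pvPick n rest (if pvClassify kv.1 = n then d.insert kv.1 kv.2 else d) := rfl

-- lookup in a dict whose items are (l.map (·, n)) ++ rest
theorem get?_mk_map_append (l : List String) (n : String) (rest : List (String × String)) (k : String) :
    (PySem.Dict.mk (l.map (fun s => (s, n)) ++ rest)).get? k
      = if l.contains k then some n else (PySem.Dict.mk rest).get? k := by
  induction l with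
  | nil => simp
  | cons x xs ih =>
    simp only [List.map_cons, List.cons_append, PySem.Dict.get?_mk_cons, ih, List.contains_cons]
    by_cases h : x = k
    · simp [h]
    · simp [h, Ne.symm h, BEq.symm_false]

set_option maxRecDepth 40000 in
theorem sectionMap_items :
    pvSectionMap = PySem.Dict.mk
      (pvBasic.map (fun s => (s, "Basic Options")) ++
       (pvConn.map (fun s => (s, "Connection Options")) ++
        (pvHttp.map (fun s => (s, "HTTP/FTP Options")) ++
         (pvBt.map (fun s => (s, "BitTorrent Options")) ++ [])))) := by
  decide

-- B's index lookup computes exactly A's elif classification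
theorem getD_sectionMap (k : String) :
    pvSectionMap.getD k "Advanced Options" = pvClassify k := by
  rw [PySem.Dict.getD_eq_get?_getD, sectionMap_items]
  rw [get?_mk_map_append, get?_mk_map_append, get?_mk_map_append, get?_mk_map_append]
  unfold pvClassify
  split_ifs <;> rfl

-- modify at each of the five literal section keys acts componentwise (kernel computation on the literal keys)
theorem pvMod1 (d1 d2 d3 d4 d5 : PySem.Dict String String) (f : PySem.Dict String String → PySem.Dict String String) :
    (PySem.Dict.mk [("Basic Options", d1), ("Connection Options", d2), ("HTTP/FTP Options", d3),
        ("BitTorrent Options", d4), ("Advanced Options", d5)]).modify "Basic Options" PySem.Dict.empty f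
      = PySem.Dict.mk [("Basic Options", f d1), ("Connection Options", d2), ("HTTP/FTP Options", d3),
        ("BitTorrent Options", d4), ("Advanced Options", d5)] := rfl

theorem pvMod2 (d1 d2 d3 d4 d5 : PySem.Dict String String) (f : PySem.Dict String String → PySem.Dict String String) :
    (PySem.Dict.mk [("Basic Options", d1), ("Connection Options", d2), ("HTTP/FTP Options", d3),
        ("BitTorrent Options", d4), ("Advanced Options", d5)]).modify "Connection Options" PySem.Dict.empty f
      = PySem.Dict.mk [("Basic Options", d1), ("Connection Options", f d2), ("HTTP/FTP Options", d3),
        ("BitTorrent Options", d4), ("Advanced Options", d5)] := rfl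

theorem pvMod3 (d1 d2 d3 d4 d5 : PySem.Dict String String) (f : PySem.Dict String String → PySem.Dict String String) :
    (PySem.Dict.mk [("Basic Options", d1), ("Connection Options", d2), ("HTTP/FTP Options", d3),
        ("BitTorrent Options", d4), ("Advanced Options", d5)]).modify "HTTP/FTP Options" PySem.Dict.empty f
      = PySem.Dict.mk [("Basic Options", d1), ("Connection Options", d2), ("HTTP/FTP Options", f d3),
        ("BitTorrent Options", d4), ("Advanced Options", d5)] := rfl

theorem pvMod4 (d1 d2 d3 d4 d5 : PySem.Dict String String) (f : PySem.Dict String String → PySem.Dict String String) :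
    (PySem.Dict.mk [("Basic Options", d1), ("Connection Options", d2), ("HTTP/FTP Options", d3),
        ("BitTorrent Options", d4), ("Advanced Options", d5)]).modify "BitTorrent Options" PySem.Dict.empty f
      = PySem.Dict.mk [("Basic Options", d1), ("Connection Options", d2), ("HTTP/FTP Options", d3),
        ("BitTorrent Options", f d4), ("Advanced Options", d5)] := rfl

theorem pvMod5 (d1 d2 d3 d4 d5 : PySem.Dict String String) (f : PySem.Dict String String → PySem.Dict String String) :
    (PySem.Dict.mk [("Basic Options", d1), ("Connection Options", d2), ("HTTP/FTP Options", d3),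
        ("BitTorrent Options", d4), ("Advanced Options", d5)]).modify "Advanced Options" PySem.Dict.empty f
      = PySem.Dict.mk [("Basic Options", d1), ("Connection Options", d2), ("HTTP/FTP Options", d3),
        ("BitTorrent Options", d4), ("Advanced Options", f d5)] := rfl

theorem pvCls1 (k : String) (h1 : pvBasic.contains k = true) : pvClassify k = "Basic Options" := by
  simp only [pvClassify, h1, if_true]

theorem pvCls2 (k : String) (h1 : pvBasic.contains k = false) (h2 : pvConn.contains k = true) :
    pvClassify k = "Connection Options" := by
  simp only [pvClassify, h1, h2, if_true, Bool.false_eq_true, if_false]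

theorem pvCls3 (k : String) (h1 : pvBasic.contains k = false) (h2 : pvConn.contains k = false)
    (h3 : pvHttp.contains k = true) : pvClassify k = "HTTP/FTP Options" := by
  simp only [pvClassify, h1, h2, h3, if_true, Bool.false_eq_true, if_false]

theorem pvCls4 (k : String) (h1 : pvBasic.contains k = false) (h2 : pvConn.contains k = false)
    (h3 : pvHttp.contains k = false) (h4 : pvBt.contains k = true) : pvClassify k = "BitTorrent Options" := by
  simp only [pvClassify, h1, h2, h3, h4, if_true, Bool.false_eq_true, if_false]

theorem pvCls5 (k : String) (h1 : pvBasic.contains k = false) (h2 : pvConn.contains k = false)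
    (h3 : pvHttp.contains k = false) (h4 : pvBt.contains k = false) : pvClassify k = "Advanced Options" := by
  simp only [pvClassify, h1, h2, h3, h4, Bool.false_eq_true, if_false]

-- A's loop, on the five-section skeleton, acts componentwise as pvPick
theorem foldA_skeleton (options : List (String × String))
    (d1 d2 d3 d4 d5 : PySem.Dict String String) :
    options.foldl (fun fd kv =>
      if pvBasic.contains kv.1 then
        fd.modify "Basic Options" PySem.Dict.empty (fun d => d.insert kv.1 kv.2)
      else if pvConn.contains kv.1 then
        fd.modify "Connection Options" PySem.Dict.empty (fun d => d.insert kv.1 kv.2)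
      else if pvHttp.contains kv.1 then
        fd.modify "HTTP/FTP Options" PySem.Dict.empty (fun d => d.insert kv.1 kv.2)
      else if pvBt.contains kv.1 then
        fd.modify "BitTorrent Options" PySem.Dict.empty (fun d => d.insert kv.1 kv.2)
      else
        fd.modify "Advanced Options" PySem.Dict.empty (fun d => d.insert kv.1 kv.2))
      (PySem.Dict.mk [("Basic Options", d1), ("Connection Options", d2),
        ("HTTP/FTP Options", d3), ("BitTorrent Options", d4), ("Advanced Options", d5)])
    = PySem.Dict.mk
        [("Basic Options", pvPick "Basic Options" options d1),
         ("Connection Options", pvPick "Connection Options" options d2),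
         ("HTTP/FTP Options", pvPick "HTTP/FTP Options" options d3),
         ("BitTorrent Options", pvPick "BitTorrent Options" options d4),
         ("Advanced Options", pvPick "Advanced Options" options d5)] := by
  induction options generalizing d1 d2 d3 d4 d5 with
  | nil => rfl
  | cons kv rest ih =>
    simp only [List.foldl_cons, pvPick_cons]
    by_cases h1 : pvBasic.contains kv.1
    · rw [if_pos h1, pvMod1, ih, pvCls1 kv.1 h1]
      simp only [String.reduceEq, reduceIte]
    · rw [Bool.not_eq_true] at h1
      rw [if_neg (by rw [h1]; exact Bool.false_ne_true)]
      by_cases h2 : pvConn.contains kv.1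
      · rw [if_pos h2, pvMod2, ih, pvCls2 kv.1 h1 h2]
        simp only [String.reduceEq, reduceIte]
      · rw [Bool.not_eq_true] at h2
        rw [if_neg (by rw [h2]; exact Bool.false_ne_true)]
        by_cases h3 : pvHttp.contains kv.1
        · rw [if_pos h3, pvMod3, ih, pvCls3 kv.1 h1 h2 h3]
          simp only [String.reduceEq, reduceIte]
        · rw [Bool.not_eq_true] at h3
          rw [if_neg (by rw [h3]; exact Bool.false_ne_true)]
          by_cases h4 : pvBt.contains kv.1
          · rw [if_pos h4, pvMod4, ih, pvCls4 kv.1 h1 h2 h3 h4]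
            simp only [String.reduceEq, reduceIte]
          · rw [Bool.not_eq_true] at h4
            rw [if_neg (by rw [h4]; exact Bool.false_ne_true), pvMod5, ih, pvCls5 kv.1 h1 h2 h3 h4]
            simp only [String.reduceEq, reduceIte]

set_option maxRecDepth 100000

-- B's per-section pass, with the lookup rewritten by getD_sectionMap, is pvPick
theorem pickedB (n : String) (options : List (String × String)) (d : PySem.Dict String String) :
    options.foldl (fun d kv =>
        if pvSectionMap.getD kv.1 "Advanced Options" == n then d.insert kv.1 kv.2 else d)
      d = pvPick n options d := by
  have hbody : (fun (d : PySem.Dict String String) (kv : String × String) =>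
      if pvSectionMap.getD kv.1 "Advanced Options" == n then d.insert kv.1 kv.2 else d)
      = (fun (d : PySem.Dict String String) (kv : String × String) =>
      if pvClassify kv.1 = n then d.insert kv.1 kv.2 else d) := by
    funext d kv
    simp only [getD_sectionMap, beq_iff_eq]
  unfold pvPick
  rw [hbody]

-- ===== VERDICT (by name: the statement is the Claim_ definition above) =====
theorem organize_options_into_sections_py_spec : Claim_equal_organize_options_into_sections_py := by
  intro options _
  unfold Spec_organize_options_into_sections_py
  unfold organize_options_into_sections_py organize_options_into_sections_py_alt
  simp only [pickedB]
  rw [show (PySem.Dict.ofList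
      [("Basic Options", (PySem.Dict.empty : PySem.Dict String String)), ("Connection Options", PySem.Dict.empty),
       ("HTTP/FTP Options", PySem.Dict.empty), ("BitTorrent Options", PySem.Dict.empty),
       ("Advanced Options", PySem.Dict.empty)])
    = PySem.Dict.mk [("Basic Options", PySem.Dict.empty), ("Connection Options", PySem.Dict.empty),
       ("HTTP/FTP Options", PySem.Dict.empty), ("BitTorrent Options", PySem.Dict.empty),
       ("Advanced Options", PySem.Dict.empty)] from rfl]
  rw [foldA_skeleton]
  simp only [pvCats, List.map, List.cons_append, List.nil_append, List.foldl_cons, List.foldl_nil,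
    List.filterMap]
  split_ifs <;> rfl
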